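-- pv_equiv track=rewrite | github.com/tdodson0612/Algorithm-Visualizer | algo_visualizer.py | generate_bitmask_dp_steps
-- ===== SOURCE A (Python) =====
-- def generate_bitmask_dp_steps(arr):
--     n = len(arr)
--     steps = []
--     dp = [False] * (1 << n)
--     dp[0] = True
--     for mask in range(1 << n):
--         if dp[mask]:
--             steps.append(([mask], dp[:]))
--             for i in range(n):
--                 if not (mask & (1 << i)):
--                     dp[mask | (1 << i)] = True
--     return steps
-- ===== SOURCE B (Python) =====
-- def generate_bitmask_dp_steps(arr):
--     n = len(arr)
--     size = 1 << n
--     return [([m], [True] + [(k ^ (1 << (k.bit_length() - 1))) < m for k in range(1, size)])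
--             for m in range(size)]
-- ===== Notes on version B (the rewrite author's own statement) =====
-- stated objective: simpler
-- what changed: Replaces the mutable dp array with its incremental propagation by a single comprehension that computes each snapshot in closed form: dp[k] is True at step m iff k==0 or k with its highest set bit cleared is < m.
import Mathlib
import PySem

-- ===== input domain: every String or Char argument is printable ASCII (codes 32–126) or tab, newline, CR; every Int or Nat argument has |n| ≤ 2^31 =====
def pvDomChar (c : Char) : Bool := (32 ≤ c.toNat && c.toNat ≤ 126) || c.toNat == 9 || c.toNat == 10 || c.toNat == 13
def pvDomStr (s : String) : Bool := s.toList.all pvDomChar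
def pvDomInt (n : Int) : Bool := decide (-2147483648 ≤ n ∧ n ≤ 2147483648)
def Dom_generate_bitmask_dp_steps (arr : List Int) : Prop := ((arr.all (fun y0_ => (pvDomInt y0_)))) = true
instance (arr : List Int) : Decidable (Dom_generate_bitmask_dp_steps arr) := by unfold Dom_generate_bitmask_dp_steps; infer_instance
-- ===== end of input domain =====

-- B drops the mutable dp array and its propagation passes and emits each snapshot in
-- closed form (dp[k] true iff k = 0 or k with its highest set bit cleared is < m); same
-- return value, no speed claim (objective: simpler).

-- ===== PORT A =====
-- literal transliteration of A: a mutable dp list threaded through two nested loops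
def generate_bitmask_dp_steps (arr : List Int) : List (List Int × List Bool) :=
  let n := arr.length
  let dp0 := (List.replicate (1 <<< n) false).set 0 true
  let res := (List.range (1 <<< n)).foldl
    (fun (st : List (List Int × List Bool) × List Bool) mask =>
      if st.2.getD mask false then
        ( st.1 ++ [([Int.ofNat mask], st.2)],
          (List.range n).foldl (fun d i =>
            if mask &&& (1 <<< i) = 0 then d.set (mask ||| (1 <<< i)) true else d) st.2 )
      else st)
    ([], dp0)
  res.1

-- ===== PORT B =====
-- Python int.bit_length for a natural number (0 for 0, log2 k + 1 otherwise); exact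
def pyBitLength (k : Nat) : Nat := if k = 0 then 0 else Nat.log2 k + 1

def generate_bitmask_dp_steps_alt (arr : List Int) : List (List Int × List Bool) :=
  let n := arr.length
  let size := 1 <<< n
  (List.range size).map (fun m =>
    ([Int.ofNat m],
     true :: (List.range' 1 (size - 1)).map (fun k =>
       decide ((k ^^^ (1 <<< (pyBitLength k - 1))) < m))))

-- ===== PRECONDITION & SPEC =====
def Spec_generate_bitmask_dp_steps (arr : List Int) (out : List (List Int × List Bool)) : Prop := out = generate_bitmask_dp_steps_alt arr
instance (arr : List Int) (out : List (List Int × List Bool)) : Decidable (Spec_generate_bitmask_dp_steps arr out) := by unfold Spec_generate_bitmask_dp_steps; infer_instance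

-- ===== CLAIM (what is proved, stated in full; the proofs are below) =====
def Claim_equal_generate_bitmask_dp_steps : Prop := ∀ (arr : List Int), Dom_generate_bitmask_dp_steps arr → Spec_generate_bitmask_dp_steps arr (generate_bitmask_dp_steps arr)

-- ===== LEMMAS AND PROOFS =====

-- k with its highest set bit cleared (B's formula)
def pvClearHigh (k : Nat) : Nat := k ^^^ (1 <<< (pyBitLength k - 1))

-- dp entry k at the start of iteration m
def pvEntry (m k : Nat) : Bool := decide (k = 0 ∨ pvClearHigh k < m)

-- the dp list at the start of iteration m
def pvDpL (n m : Nat) : List Bool := (List.range (2 ^ n)).map (pvEntry m)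

theorem pvClearHigh_eq (k : Nat) (hk : k ≠ 0) : pvClearHigh k = k ^^^ 2 ^ Nat.log2 k := by
  simp [pvClearHigh, pyBitLength, hk, Nat.one_shiftLeft]

theorem pvTestBit_clearHigh (k j : Nat) (hk : k ≠ 0) :
    (pvClearHigh k).testBit j = ((k.testBit j) ^^ decide (Nat.log2 k = j)) := by
  rw [pvClearHigh_eq k hk, Nat.testBit_xor, Nat.testBit_two_pow]

theorem pvTestBit_high (k : Nat) (hk : k ≠ 0) : k.testBit (Nat.log2 k) = true :=
  Nat.testBit_log2 hk

theorem pvTestBit_above (k j : Nat) (hj : Nat.log2 k < j) : k.testBit j = false := by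
  rcases Nat.eq_zero_or_pos k with h | h
  · simp [h]
  · exact Nat.testBit_lt_two_pow (lt_of_lt_of_le Nat.lt_log2_self
      (Nat.pow_le_pow_right (by norm_num) hj))

theorem pvClearHigh_lt (k : Nat) (hk : k ≠ 0) : pvClearHigh k < k := by
  refine Nat.lt_of_testBit (Nat.log2 k) ?_ (pvTestBit_high k hk) ?_
  · simp [pvTestBit_clearHigh k _ hk, pvTestBit_high k hk]
  · intro j hj
    rw [pvTestBit_clearHigh k j hk, pvTestBit_above k j hj]
    simp [Nat.ne_of_lt hj]

theorem pvTestBit_le_log2 (k i : Nat) (h : k.testBit i = true) : i ≤ Nat.log2 k := by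
  by_contra hc
  rw [pvTestBit_above k i (by omega)] at h
  exact Bool.false_ne_true h

theorem pvLog2_lt (k n : Nat) (hk : k ≠ 0) (h : k < 2 ^ n) : Nat.log2 k < n :=
  (Nat.log2_lt hk).2 h


theorem pvOr_ne (m i : Nat) : m ||| 2 ^ i ≠ 0 := by
  intro h
  have : (m ||| 2 ^ i).testBit i = true := by
    simp [Nat.testBit_or, Nat.testBit_two_pow]
  rw [h] at this
  simp [Nat.zero_testBit] at this

theorem pvAnd_eq_zero (m i : Nat) (h : m &&& 2 ^ i = 0) : m.testBit i = false := by
  have h2 := Nat.and_two_pow m i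
  rw [h] at h2
  rcases hb : m.testBit i with _ | _
  · rfl
  · rw [hb] at h2
    simp at h2
    exact absurd h2.symm (Nat.pos_iff_ne_zero.1 (Nat.two_pow_pos i))

-- clearing the high bit of m ||| 2^i when i IS the high bit gives back m
theorem pvClearHigh_or_eq (m i : Nat) (hmi : m.testBit i = false)
    (hiH : Nat.log2 (m ||| 2 ^ i) = i) : pvClearHigh (m ||| 2 ^ i) = m := by
  apply Nat.eq_of_testBit_eq
  intro j
  rw [pvTestBit_clearHigh _ j (pvOr_ne m i), hiH, Nat.testBit_or, Nat.testBit_two_pow]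
  by_cases hji : i = j
  · subst hji; simp [hmi]
  · simp [hji]

-- clearing the high bit of m ||| 2^i when i is BELOW the high bit gives something < m
theorem pvClearHigh_or_lt (m i : Nat) (hmi : m.testBit i = false)
    (hiH : i < Nat.log2 (m ||| 2 ^ i)) : pvClearHigh (m ||| 2 ^ i) < m := by
  have hne := pvOr_ne m i
  have hmh : m.testBit (Nat.log2 (m ||| 2 ^ i)) = true := by
    have h1 : (m ||| 2 ^ i).testBit (Nat.log2 (m ||| 2 ^ i)) = true := pvTestBit_high _ hne
    rw [Nat.testBit_or, Nat.testBit_two_pow] at h1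
    simpa [show ¬ i = Nat.log2 (m ||| 2 ^ i) by omega] using h1
  refine Nat.lt_of_testBit (Nat.log2 (m ||| 2 ^ i)) ?_ hmh ?_
  · rw [pvTestBit_clearHigh _ _ hne]
    simp [pvTestBit_high _ hne]
  · intro j hj
    rw [pvTestBit_clearHigh _ j hne, pvTestBit_above _ j hj]
    have hor : (m ||| 2 ^ i).testBit j = false := pvTestBit_above _ j hj
    rw [Nat.testBit_or, Nat.testBit_two_pow] at hor
    simp only [Bool.or_eq_false_iff] at hor
    simp [Nat.ne_of_lt hj, hor.1]

-- setting the high bit of k (k ≠ 0) on pvClearHigh k gives back k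
theorem pvOr_clearHigh (k : Nat) (hk : k ≠ 0) :
    pvClearHigh k ||| 2 ^ Nat.log2 k = k := by
  apply Nat.eq_of_testBit_eq
  intro j
  rw [Nat.testBit_or, pvTestBit_clearHigh _ j hk, Nat.testBit_two_pow]
  by_cases hj : Nat.log2 k = j
  · subst hj; simp [pvTestBit_high k hk]
  · simp [hj]

theorem pvClearHigh_and_high (k : Nat) (hk : k ≠ 0) :
    pvClearHigh k &&& 2 ^ Nat.log2 k = 0 := by
  rw [Nat.and_two_pow, pvTestBit_clearHigh _ _ hk]
  simp [pvTestBit_high k hk]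

-- the crux: the inner propagation pass advances the closed-form entry by one step
theorem pvEntry_step (n m k : Nat) (hk : k < 2 ^ n) :
    (pvEntry m k || decide (∃ i, i < n ∧ k = m ||| 2 ^ i ∧ m &&& 2 ^ i = 0))
      = pvEntry (m + 1) k := by
  simp only [pvEntry, ← Bool.decide_or, decide_eq_decide]
  constructor
  · rintro ((h0 | hlt) | ⟨i, hin, hk', hand⟩)
    · exact Or.inl h0
    · exact Or.inr (by omega)
    · subst hk'
      have hmi : m.testBit i = false := pvAnd_eq_zero m i hand
      have hile : i ≤ Nat.log2 (m ||| 2 ^ i) :=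
        pvTestBit_le_log2 _ _ (by simp [Nat.testBit_or, Nat.testBit_two_pow])
      rcases eq_or_lt_of_le hile with heq | hlt'
      · have := pvClearHigh_or_eq m i hmi heq.symm
        omega
      · have := pvClearHigh_or_lt m i hmi hlt'
        omega
  · rintro (h0 | hlt)
    · exact Or.inl (Or.inl h0)
    · by_cases hk0 : k = 0
      · exact Or.inl (Or.inl hk0)
      · rcases Nat.lt_or_ge (pvClearHigh k) m with h | h
        · exact Or.inl (Or.inr h)
        · have heq : pvClearHigh k = m := by omega
          exact Or.inr ⟨Nat.log2 k, pvLog2_lt k n hk0 hk,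
            by rw [← heq, pvOr_clearHigh k hk0],
            by rw [← heq, pvClearHigh_and_high k hk0]⟩

-- the inner foldl only sets entries true; pointwise description of the result
theorem pvFoldlSet_getD (l : List Nat) (P : Nat → Prop) [DecidablePred P] (f : Nat → Nat)
    (dp : List Bool) (k : Nat) (hk : k < dp.length)
    (hf : ∀ i, i ∈ l → P i → f i < dp.length) :
    ((l.foldl (fun d i => if P i then d.set (f i) true else d) dp).getD k false)
      = (dp.getD k false || l.any (fun i => decide (P i) && f i == k)) := by
  induction l generalizing dp with
  | nil => simp
  | cons a t ih =>
    simp only [List.foldl_cons, List.any_cons]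
    by_cases hca : P a
    · rw [if_pos hca]
      rw [ih (dp.set (f a) true) (by simpa using hk)
        (fun i hi hc => by simpa using hf i (List.mem_cons_of_mem a hi) hc)]
      have hset : (dp.set (f a) true).getD k false
          = (dp.getD k false || (f a == k)) := by
        by_cases hfk : f a = k
        · subst hfk
          rw [List.getD_eq_getElem _ _ (by simpa using hk),
            List.getElem_set_self (h := by simpa using hf a (by simp) hca)]
          simp
        · rw [List.getD_eq_getElem _ _ (by simpa using hk),
            List.getElem_set_ne (h := hfk) (hj := by simpa using hk),
            List.getD_eq_getElem _ _ hk]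
          simp [hfk]
      rw [hset]
      cases hb : (f a == k) <;> simp [hca, Bool.or_comm]
    · rw [if_neg hca]
      rw [ih dp hk (fun i hi hc => hf i (List.mem_cons_of_mem a hi) hc)]
      simp [hca]

theorem pvDpL_length (n m : Nat) : (pvDpL n m).length = 2 ^ n := by
  simp [pvDpL]

theorem pvDpL_getD (n m k : Nat) (hk : k < 2 ^ n) :
    (pvDpL n m).getD k false = pvEntry m k := by
  rw [pvDpL, List.getD_eq_getElem _ _ (by simpa using hk)]
  simp

theorem pvFoldlSet_length (l : List Nat) (P : Nat → Prop) [DecidablePred P] (f : Nat → Nat)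
    (dp : List Bool) :
    (l.foldl (fun d i => if P i then d.set (f i) true else d) dp).length = dp.length := by
  induction l generalizing dp with
  | nil => rfl
  | cons a t ih =>
    simp only [List.foldl_cons]
    split
    · rw [ih]; simp
    · exact ih dp

-- one propagation pass sends pvDpL n m to pvDpL n (m+1)
theorem pvInner_step (n m : Nat) (hm : m < 2 ^ n) :
    (List.range n).foldl (fun d i =>
        if m &&& (1 <<< i) = 0 then d.set (m ||| (1 <<< i)) true else d) (pvDpL n m)
      = pvDpL n (m + 1) := by
  simp only [Nat.one_shiftLeft]
  apply List.ext_getElem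
  · rw [pvFoldlSet_length, pvDpL_length, pvDpL_length]
  · intro k h1 h2
    have hk : k < 2 ^ n := by rwa [pvDpL_length] at h2
    have hdp : k < (pvDpL n m).length := by rwa [pvDpL_length]
    have hfold := pvFoldlSet_getD (List.range n) (fun i => m &&& 2 ^ i = 0)
      (fun i => m ||| 2 ^ i) (pvDpL n m) k hdp
      (fun i hi _ => by
        rw [pvDpL_length]
        exact Nat.or_lt_two_pow hm (Nat.pow_lt_pow_right (by norm_num) (List.mem_range.1 hi)))
    simp only [pvDpL_getD n m k hk] at hfold
    have hany : ((List.range n).any fun i => decide (m &&& 2 ^ i = 0) && (m ||| 2 ^ i == k))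
        = decide (∃ i, i < n ∧ k = m ||| 2 ^ i ∧ m &&& 2 ^ i = 0) := by
      rw [Bool.eq_iff_iff]
      simp only [List.any_eq_true, List.mem_range, Bool.and_eq_true, decide_eq_true_eq,
        beq_iff_eq]
      constructor
      · rintro ⟨i, hi, hc, he⟩; exact ⟨i, hi, he.symm, hc⟩
      · rintro ⟨i, hi, he, hc⟩; exact ⟨i, hi, hc, he.symm⟩
    rw [← List.getD_eq_getElem _ false h1, ← List.getD_eq_getElem _ false h2,
      hfold, pvDpL_getD n (m + 1) k hk, hany, pvEntry_step n m k hk]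

-- pvEntry m m is always true: every mask is reachable by its own turn
theorem pvEntry_self (m : Nat) : pvEntry m m = true := by
  rcases Nat.eq_zero_or_pos m with h | h
  · simp [pvEntry, h]
  · simp [pvEntry, pvClearHigh_lt m (by omega)]

-- the initial dp list of port A is pvDpL n 0
theorem pvDpL_zero (n : Nat) : (List.replicate (1 <<< n) false).set 0 true = pvDpL n 0 := by
  apply List.ext_getElem
  · simp [pvDpL_length, Nat.one_shiftLeft]
  · intro k h1 h2
    have hk : k < 2 ^ n := by rwa [pvDpL_length] at h2
    rcases Nat.eq_zero_or_pos k with h | h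
    · subst h
      rw [List.getElem_set_self (h := by simpa [Nat.one_shiftLeft] using hk)]
      simp [pvDpL, pvEntry]
    · rw [List.getElem_set_ne (h := by omega) (hj := h1)]
      simp [pvDpL, pvEntry, Nat.pos_iff_ne_zero.1 h]

-- the outer loop invariant of port A
theorem pvOuter_inv (n m : Nat) (hm : m ≤ 2 ^ n) :
    (List.range m).foldl
      (fun (st : List (List Int × List Bool) × List Bool) mask =>
        if st.2.getD mask false then
          ( st.1 ++ [([Int.ofNat mask], st.2)],
            (List.range n).foldl (fun d i =>
              if mask &&& (1 <<< i) = 0 then d.set (mask ||| (1 <<< i)) true else d) st.2 )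
        else st)
      ([], pvDpL n 0)
    = ((List.range m).map (fun j => ([Int.ofNat j], pvDpL n j)), pvDpL n m) := by
  induction m with
  | zero => simp
  | succ m ih =>
    have hm' : m ≤ 2 ^ n := by omega
    rw [List.range_succ, List.foldl_append, ih hm', List.map_append]
    simp only [List.foldl_cons, List.foldl_nil, List.map_cons, List.map_nil]
    rw [if_pos (by rw [pvDpL_getD n m m (by omega)]; exact pvEntry_self m)]
    rw [pvInner_step n m (by omega)]

-- B's snapshot equals pvDpL n m
theorem pvSnap_eq (n m : Nat) :
    (true :: (List.range' 1 (2 ^ n - 1)).map (fun k =>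
        decide ((k ^^^ (1 <<< (pyBitLength k - 1))) < m)))
      = pvDpL n m := by
  have h1 : 2 ^ n = (2 ^ n - 1) + 1 := by
    have := Nat.one_le_two_pow (n := n); omega
  rw [pvDpL, h1, List.range_eq_range', List.range'_succ, List.map_cons]
  have hhead : pvEntry m 0 = true := by simp [pvEntry]
  have htail : (List.range' 1 (2 ^ n - 1)).map (pvEntry m)
      = (List.range' 1 (2 ^ n - 1)).map (fun k =>
          decide ((k ^^^ (1 <<< (pyBitLength k - 1))) < m)) := by
    apply List.map_congr_left
    intro k hk
    have h1k : 1 ≤ k := (List.mem_range'_1.1 hk).1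
    simp [pvEntry, pvClearHigh, Nat.pos_iff_ne_zero.1 h1k]
  rw [hhead, htail, Nat.add_sub_cancel]

-- ===== VERDICT (by name: the statement is the Claim_ definition above) =====
theorem generate_bitmask_dp_steps_spec : Claim_equal_generate_bitmask_dp_steps := by
  intro arr _
  unfold Spec_generate_bitmask_dp_steps generate_bitmask_dp_steps generate_bitmask_dp_steps_alt
  simp only []
  rw [pvDpL_zero arr.length,
    show (1 <<< arr.length) = 2 ^ arr.length from Nat.one_shiftLeft _,
    pvOuter_inv arr.length (2 ^ arr.length) (le_refl _)]
  apply List.map_congr_left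
  intro m _
  rw [pvSnap_eq arr.length m]
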